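-- pv_equiv track=rewrite | github.com/ahilasree/as400parser | rpg/ast_builder.py | _extract_embedded_sql
-- ===== SOURCE A (Python) =====
-- def _extract_embedded_sql(lines: list[str], start_col: int) -> str:
--     """Extract full embedded SQL from lines."""
--     out: list[str] = []
--     for line in lines:
--         s = line.strip()
--         out.append(s)
--         if "END-EXEC" in s.upper() or "END-SQL" in s.upper():
--             break
--     return "\n".join(out)
-- ===== SOURCE B (Python) =====
-- def _extract_embedded_sql(lines: list[str], start_col: int) -> str:
--     """Extract full embedded SQL from lines."""
--     stripped = [l.strip() for l in lines]
--     end = next((i for i, s in enumerate(stripped)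
--                 if "END-EXEC" in s.upper() or "END-SQL" in s.upper()),
--                len(stripped) - 1)
--     return "\n".join(stripped[:end + 1])
-- ===== Notes on version B (the rewrite author's own statement) =====
-- stated objective: alternative
-- what changed: Replaces the single accumulate-and-break loop by two passes: first find the index of the terminator line (defaulting to the last index), then strip-and-join the prefix slice up to it.
import Mathlib
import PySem

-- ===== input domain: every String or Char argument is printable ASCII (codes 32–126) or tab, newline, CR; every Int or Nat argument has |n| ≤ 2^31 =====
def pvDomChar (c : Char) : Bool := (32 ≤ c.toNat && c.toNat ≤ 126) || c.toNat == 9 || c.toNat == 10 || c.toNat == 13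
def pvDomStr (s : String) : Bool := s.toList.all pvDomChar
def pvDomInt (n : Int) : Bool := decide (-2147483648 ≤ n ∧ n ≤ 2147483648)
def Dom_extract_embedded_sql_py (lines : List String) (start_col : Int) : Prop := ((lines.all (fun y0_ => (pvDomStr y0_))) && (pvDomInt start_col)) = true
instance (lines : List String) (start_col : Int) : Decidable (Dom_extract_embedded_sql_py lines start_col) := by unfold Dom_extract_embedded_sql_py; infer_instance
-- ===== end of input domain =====

-- B is an alternative decomposition (find the terminator index first, then strip-and-join the
-- prefix slice) of A's accumulate-and-break loop; same cost, return values proved equal.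

-- ===== PORT A =====
-- the loop of A: append stripped lines, stop after the first line containing a terminator
def pvGoA : List String → List String
  | [] => []
  | line :: rest =>
    let s := PySem.Str.strip line
    if PySem.Str.isIn "END-EXEC" (PySem.Str.upper s) || PySem.Str.isIn "END-SQL" (PySem.Str.upper s)
    then [s]
    else s :: pvGoA rest

def extract_embedded_sql_py (lines : List String) (_start_col : Int) : String :=
  PySem.Str.join "\n" (pvGoA lines)

-- ===== PORT B =====
-- the terminator test of B (on an already-stripped line)
def pvIsTerm (s : String) : Bool :=
  PySem.Str.isIn "END-EXEC" (PySem.Str.upper s) || PySem.Str.isIn "END-SQL" (PySem.Str.upper s)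

-- B's generator: index of the first terminator line, if any (next(... enumerate ...))
def pvFindTerm : List String → Nat → Option Nat
  | [], _ => none
  | s :: rest, i => if pvIsTerm s then some i else pvFindTerm rest (i + 1)

def extract_embedded_sql_py_alt (lines : List String) (_start_col : Int) : String :=
  let stripped := lines.map PySem.Str.strip
  let endIdx : Int :=
    match pvFindTerm stripped 0 with
    | some i => (i : Int)
    | none => (stripped.length : Int) - 1
  PySem.Str.join "\n" (PySem.List.slice stripped none (some (endIdx + 1)))

-- ===== PRECONDITION & SPEC =====
def Spec_extract_embedded_sql_py (lines : List String) (start_col : Int) (out : String) : Prop := out = extract_embedded_sql_py_alt lines start_col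
instance (lines : List String) (start_col : Int) (out : String) : Decidable (Spec_extract_embedded_sql_py lines start_col out) := by unfold Spec_extract_embedded_sql_py; infer_instance

-- ===== CLAIM (what is proved, stated in full; the proofs are below) =====
def Claim_equal_extract_embedded_sql_py : Prop := ∀ (lines : List String) (start_col : Int), Dom_extract_embedded_sql_py lines start_col → Spec_extract_embedded_sql_py lines start_col (extract_embedded_sql_py lines start_col)

-- ===== LEMMAS AND PROOFS =====

lemma pvFindTerm_succ (xs : List String) (i : Nat) :
    pvFindTerm xs (i + 1) = (pvFindTerm xs i).map (· + 1) := by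
  induction xs generalizing i with
  | nil => simp [pvFindTerm]
  | cons s rest ih =>
    simp only [pvFindTerm]
    split <;> simp [ih]

lemma pvGoA_eq_take (lines : List String) :
    pvGoA lines = (lines.map PySem.Str.strip).take
      (match pvFindTerm (lines.map PySem.Str.strip) 0 with
       | some j => j + 1
       | none => lines.length) := by
  induction lines with
  | nil => simp [pvGoA, pvFindTerm]
  | cons line rest ih =>
    simp only [List.map_cons, pvFindTerm]
    by_cases h : pvIsTerm (PySem.Str.strip line)
    · simp [pvGoA, pvIsTerm] at h ⊢
      rcases h with h | h <;> simp [h]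
    · have h' : (PySem.Str.isIn "END-EXEC" (PySem.Str.upper (PySem.Str.strip line)) ||
          PySem.Str.isIn "END-SQL" (PySem.Str.upper (PySem.Str.strip line))) = false := by
        simpa [pvIsTerm] using h
      simp only [pvGoA, h', Bool.false_eq_true, if_false]
      rw [if_neg (by simp [h]), pvFindTerm_succ]
      cases hf : pvFindTerm (rest.map PySem.Str.strip) 0 with
      | none => simp [ih, hf]
      | some j => simp [ih, hf]

-- ===== VERDICT (by name: the statement is the Claim_ definition above) =====
theorem extract_embedded_sql_py_spec : Claim_equal_extract_embedded_sql_py := by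
  intro lines start_col _
  show extract_embedded_sql_py lines start_col = extract_embedded_sql_py_alt lines start_col
  unfold extract_embedded_sql_py extract_embedded_sql_py_alt
  simp only
  congr 1
  rw [pvGoA_eq_take]
  cases hf : pvFindTerm (lines.map PySem.Str.strip) 0 with
  | some j =>
    simp only
    have : ((j : Int) + 1) = ((j + 1 : Nat) : Int) := by push_cast; ring
    rw [this, PySem.List.slice_to_natCast]
  | none =>
    simp only
    have : ((lines.map PySem.Str.strip).length : Int) - 1 + 1
        = ((lines.length : Nat) : Int) := by simp
    rw [this, PySem.List.slice_to_natCast]
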